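-- pv_equiv track=rewrite | github.com/yanimica/tp-matematica | TP2-INTEGRADOR-MATE-V.FINAL (1).py | frecuencia_digitos
-- ===== SOURCE A (Python) =====
-- def frecuencia_digitos(dnis):
--     # Se crea un diccionario para almacenar las frecuencias de cada persona.
--     frecuencias = {}
--
--     # Se recorre el conjunto de DNIs, uno por cada persona.
--     for nombre, dni in dnis.items():
--         freq = {}
--
--         # Se recorren los dígitos del DNI uno por uno.
--         for digito in dni:
--             # Se cuenta cuántas veces aparece cada dígito.
--             # Si el dígito ya está, se suma 1. Si no, se inicia en 1.
--             freq[digito] = freq.get(digito, 0) + 1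
--
--         # Se guarda la frecuencia en el diccionario principal.
--         frecuencias[nombre] = freq
--
--     return frecuencias
-- ===== SOURCE B (Python) =====
-- def frecuencia_digitos(dnis):
--     # One dict comprehension per person: take the distinct digits in first-occurrence
--     # order (dict.fromkeys) and count each by rescanning the DNI with str.count.
--     return {nombre: {d: dni.count(d) for d in dict.fromkeys(dni)}
--             for nombre, dni in dnis.items()}
-- ===== Notes on version B (the rewrite author's own statement) =====
-- stated objective: simpler
-- what changed: Replaces A's incremental accumulating pass (get-then-insert per character) with a distinct-digit pass that rescans the DNI once per distinct digit via str.count, expressed as one nested dict comprehension.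
import Mathlib
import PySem

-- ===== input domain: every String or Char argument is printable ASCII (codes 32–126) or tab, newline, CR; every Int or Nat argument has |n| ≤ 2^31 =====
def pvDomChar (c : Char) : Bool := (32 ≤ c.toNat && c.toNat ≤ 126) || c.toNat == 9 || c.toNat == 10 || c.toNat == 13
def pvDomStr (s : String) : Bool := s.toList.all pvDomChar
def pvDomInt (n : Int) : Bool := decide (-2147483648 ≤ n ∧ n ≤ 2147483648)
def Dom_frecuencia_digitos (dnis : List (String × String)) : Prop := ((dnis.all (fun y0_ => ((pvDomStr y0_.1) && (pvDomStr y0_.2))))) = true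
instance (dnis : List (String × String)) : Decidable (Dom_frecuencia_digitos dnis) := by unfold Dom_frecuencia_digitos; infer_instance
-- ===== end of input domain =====

-- B replaces A's incremental counting pass with a per-distinct-digit rescan (dict
-- comprehension over dict.fromkeys + str.count); same values, simpler code, not faster.


-- ===== PORT A =====
-- for digito in dni: freq[digito] = freq.get(digito, 0) + 1; keys are Chars (Python
-- 1-char strings), rendered as String on output (exact: str iteration yields 1-char strs).
def frecuencia_digitos (dnis : List (String × String)) : List (String × List (String × Int)) :=
  (dnis.foldl
    (fun frecuencias p =>
      frecuencias.insert p.1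
        (((p.2.toList.foldl (fun freq digito => freq.insert digito (freq.getD digito 0 + 1))
            (PySem.Dict.empty : PySem.Dict Char Int)).items).map (fun q => (String.mk [q.1], q.2))))
    (PySem.Dict.empty : PySem.Dict String (List (String × Int)))).items

-- ===== PORT B =====
-- {nombre: {d: dni.count(d) for d in dict.fromkeys(dni)} for nombre, dni in dnis.items()}
def frecuencia_digitos_alt (dnis : List (String × String)) : List (String × List (String × Int)) :=
  dnis.map (fun p =>
    (p.1, (PySem.List.dedup p.2.toList).map
            (fun d => (String.mk [d], (PySem.List.count p.2.toList d : Int)))))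

-- ===== PRECONDITION & SPEC =====
-- The argument is a Python dict, so its association-list rendering has pairwise
-- distinct keys; Pre_ states exactly that (lists with duplicate names denote no dict).
def Pre_frecuencia_digitos (dnis : List (String × String)) : Prop :=
  (dnis.map Prod.fst).Nodup
instance (dnis : List (String × String)) : Decidable (Pre_frecuencia_digitos dnis) := by
  unfold Pre_frecuencia_digitos; infer_instance
def pvWitness_frecuencia_digitos : (List (String × String)) := [("ana", "1123"), ("bob", "")]

def Spec_frecuencia_digitos (dnis : List (String × String)) (out : List (String × List (String × Int))) : Prop := out = frecuencia_digitos_alt dnis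
instance (dnis : List (String × String)) (out : List (String × List (String × Int))) : Decidable (Spec_frecuencia_digitos dnis out) := by unfold Spec_frecuencia_digitos; infer_instance

-- ===== CLAIM (what is proved, stated in full; the proofs are below) =====
def Claim_equal_frecuencia_digitos : Prop := ∀ (dnis : List (String × String)), Dom_frecuencia_digitos dnis → Pre_frecuencia_digitos dnis → Spec_frecuencia_digitos dnis (frecuencia_digitos dnis)

-- ===== LEMMAS AND PROOFS =====

-- A's inner counting loop is Counter(dni); its items are B's dedup-and-count list.
theorem inner_eq (s : String) :
    ((s.toList.foldl (fun freq digito => freq.insert digito (freq.getD digito 0 + 1))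
        (PySem.Dict.empty : PySem.Dict Char Int)).items).map (fun q => (String.mk [q.1], q.2))
      = (PySem.List.dedup s.toList).map
          (fun d => (String.mk [d], (PySem.List.count s.toList d : Int))) := by
  rw [PySem.Dict.foldl_insert_getD_add_one_eq_counter, PySem.Dict.items_counter,
      List.map_map]
  simp [PySem.List.count_eq, PySem.List.dedup_eq_ofList, Function.comp]

-- ===== VERDICT (by name: the statement is the Claim_ definition above) =====
theorem frecuencia_digitos_spec : Claim_equal_frecuencia_digitos := by
  intro dnis _ hpre
  unfold Spec_frecuencia_digitos frecuencia_digitos frecuencia_digitos_alt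
  rw [PySem.Dict.items_foldl_insert_fresh
        (k := Prod.fst)
        (hdis := by intro a _; exact PySem.Dict.contains_empty _)
        (hnd := hpre)]
  rw [show (PySem.Dict.empty : PySem.Dict String (List (String × Int))).items = [] from rfl,
      List.nil_append]
  exact List.map_congr_left (fun p _ => by rw [inner_eq])
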